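-- pv_equiv track=rewrite | github.com/bearblog/CoreRank | utils.py | strip_stopwords
-- ===== SOURCE A (Python) =====
-- def strip_stopwords(tokenized_tagged_sentence, stopwords):
--     """ Strip stopwords
--     Consecutive stopwords at head and tail of tagged utterance are stripped
--     """
--     ib = 0
--     ie = 0
--
--     for i in range(len(tokenized_tagged_sentence)):
--
--         if tokenized_tagged_sentence[i].split('/')[0].lower() in stopwords:
--             ib += 1
--         else:
--             break
--     for j in range(1, len(tokenized_tagged_sentence) + 1):
--
--         if tokenized_tagged_sentence[-j].split('/')[0].lower() in stopwords:
--             ie += 1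
--         else:
--             break
--     return tokenized_tagged_sentence[ib:len(tokenized_tagged_sentence) - ie]
-- ===== SOURCE B (Python) =====
-- def strip_stopwords(tokenized_tagged_sentence, stopwords):
--     keep = [i for i, t in enumerate(tokenized_tagged_sentence)
--             if t.split('/')[0].lower() not in stopwords]
--     if not keep:
--         return tokenized_tagged_sentence[:0]
--     return tokenized_tagged_sentence[keep[0]:keep[-1] + 1]
-- ===== Notes on version B (the rewrite author's own statement) =====
-- stated objective: simpler
-- what changed: Instead of two directional scans counting consecutive leading/trailing stopwords and slicing by those counts, B builds in one pass the list of indices of non-stopword tokens and slices from its first to its last element.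
import Mathlib
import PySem

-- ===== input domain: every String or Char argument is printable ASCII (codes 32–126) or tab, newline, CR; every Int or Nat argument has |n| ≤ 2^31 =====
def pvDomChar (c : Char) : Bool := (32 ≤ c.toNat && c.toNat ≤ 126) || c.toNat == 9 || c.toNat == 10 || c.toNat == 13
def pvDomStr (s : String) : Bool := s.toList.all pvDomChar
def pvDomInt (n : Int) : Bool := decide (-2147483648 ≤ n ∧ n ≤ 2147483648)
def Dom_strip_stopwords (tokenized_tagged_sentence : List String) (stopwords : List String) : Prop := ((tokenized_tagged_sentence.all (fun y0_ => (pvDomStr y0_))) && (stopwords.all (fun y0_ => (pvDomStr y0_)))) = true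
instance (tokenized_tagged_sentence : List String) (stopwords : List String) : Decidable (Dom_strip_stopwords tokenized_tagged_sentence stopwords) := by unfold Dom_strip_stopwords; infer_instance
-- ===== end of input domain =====

-- B replaces A's two directional stopword-counting scans by one pass collecting
-- the indices of non-stopword tokens and slicing from the first to the last (simpler decomposition).


-- ===== PORT A =====
-- 'token.split('/')[0].lower() in stopwords' — the stopword test both Pythons spell identically
def pvStop (stopwords : List String) (t : String) : Bool :=
  stopwords.contains (PySem.Str.lower (((PySem.Str.split? t "/").getD []).headD ""))

-- A's 'for … if stop: counter += 1 else: break' loop: length of the stopword prefix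
def pvLead (stopwords : List String) : List String → Nat
  | [] => 0
  | t :: ts => if pvStop stopwords t then pvLead stopwords ts + 1 else 0

def strip_stopwords (tokenized_tagged_sentence : List String) (stopwords : List String) : List String :=
  let ib := pvLead stopwords tokenized_tagged_sentence
  -- second loop reads s[-1], s[-2], …: the same scan over the reversed list
  let ie := pvLead stopwords tokenized_tagged_sentence.reverse
  PySem.List.slice tokenized_tagged_sentence (some (ib : Int))
    (some ((tokenized_tagged_sentence.length : Int) - (ie : Int)))

-- ===== PORT B =====
def strip_stopwords_alt (tokenized_tagged_sentence : List String) (stopwords : List String) : List String :=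
  let keep := ((PySem.List.enumerate tokenized_tagged_sentence 0).filter
      (fun q => !(pvStop stopwords q.2))).map (·.1)
  match keep with
  | [] => PySem.List.slice tokenized_tagged_sentence (some 0) (some 0)
  | i :: _ => PySem.List.slice tokenized_tagged_sentence (some i) (some (keep.getLastD 0 + 1))

-- ===== PRECONDITION & SPEC =====
def Spec_strip_stopwords (tokenized_tagged_sentence : List String) (stopwords : List String) (out : List String) : Prop := out = strip_stopwords_alt tokenized_tagged_sentence stopwords
instance (tokenized_tagged_sentence : List String) (stopwords : List String) (out : List String) : Decidable (Spec_strip_stopwords tokenized_tagged_sentence stopwords out) := by unfold Spec_strip_stopwords; infer_instance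

-- ===== CLAIM (what is proved, stated in full; the proofs are below) =====
def Claim_equal_strip_stopwords : Prop := ∀ (tokenized_tagged_sentence : List String) (stopwords : List String), Dom_strip_stopwords tokenized_tagged_sentence stopwords → Spec_strip_stopwords tokenized_tagged_sentence stopwords (strip_stopwords tokenized_tagged_sentence stopwords)

-- ===== LEMMAS AND PROOFS =====

theorem pvLead_eq_takeWhile (sw : List String) (l : List String) :
    pvLead sw l = (l.takeWhile (pvStop sw)).length := by
  induction l with
  | nil => rfl
  | cons t ts ih =>
    by_cases h : pvStop sw t = true <;> simp [pvLead, List.takeWhile, h, ih]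

theorem pvKeep_nil_iff (sw : List String) (l : List String) (s : Int) :
    (((PySem.List.enumerate l s).filter (fun q => !(pvStop sw q.2))).map (·.1)) = [] ↔
      l.all (pvStop sw) = true := by
  induction l generalizing s with
  | nil => simp [PySem.List.enumerate_nil]
  | cons t ts ih =>
    by_cases h : pvStop sw t = true <;>
      simp [PySem.List.enumerate_cons, h, ih]

theorem pvKeep_head (sw : List String) (l : List String) (s : Int)
    (h : ¬ l.all (pvStop sw) = true) :
    (((PySem.List.enumerate l s).filter (fun q => !(pvStop sw q.2))).map (·.1)).head? =
      some (s + ((l.takeWhile (pvStop sw)).length : Int)) := by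
  induction l generalizing s with
  | nil => simp at h
  | cons t ts ih =>
    by_cases ht : pvStop sw t = true
    · have hts : ¬ ts.all (pvStop sw) = true := by simp [ht] at h; simpa using h
      simp only [PySem.List.enumerate_cons, List.filter_cons, ht, Bool.not_true,
        Bool.false_eq_true, if_false, List.takeWhile]
      rw [ih _ hts]
      congr 1
      simp only [List.length_cons]
      push_cast
      omega
    · simp [PySem.List.enumerate_cons, ht, List.takeWhile]

-- the reversed list of a not-all-stopword list keeps a strict stopword prefix
theorem pvTakeWhile_rev_append (sw : List String) (ts : List String) (t : String)
    (hts : ¬ ts.all (pvStop sw) = true) :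
    (ts.reverse ++ [t]).takeWhile (pvStop sw) = ts.reverse.takeWhile (pvStop sw) := by
  rw [List.takeWhile_append, if_neg]
  intro hl
  have heq : ts.reverse.takeWhile (pvStop sw) = ts.reverse :=
    (List.takeWhile_prefix (pvStop sw)).eq_of_length hl
  exact hts (by
    have := List.takeWhile_eq_self_iff.mp heq
    simpa [List.all_eq_true] using fun x hx => this x (List.mem_reverse.mpr hx))

theorem pvKeep_last (sw : List String) (l : List String) (s : Int)
    (h : ¬ l.all (pvStop sw) = true) :
    (((PySem.List.enumerate l s).filter (fun q => !(pvStop sw q.2))).map (·.1)).getLast? =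
      some (s + (l.length : Int) - 1 - ((l.reverse.takeWhile (pvStop sw)).length : Int)) := by
  induction l generalizing s with
  | nil => simp at h
  | cons t ts ih =>
    by_cases hts : ts.all (pvStop sw) = true
    · have ht : ¬ pvStop sw t = true := by
        intro hc; exact h (by simp [hc, hts])
      have hnil := (pvKeep_nil_iff sw ts (s + 1)).mpr hts
      have htsr : ts.reverse.takeWhile (pvStop sw) = ts.reverse :=
        List.takeWhile_eq_self_iff.mpr (by
          intro x hx
          exact (List.all_eq_true.mp hts) x (List.mem_reverse.mp hx))
      have hrev : (ts.reverse ++ [t]).takeWhile (pvStop sw) = ts.reverse := by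
        rw [List.takeWhile_append, if_pos (by rw [htsr])]
        simp [List.takeWhile, ht]
      simp only [PySem.List.enumerate_cons, List.filter_cons, ht, Bool.not_false, if_true,
        List.map_cons, hnil, List.getLast?_cons, List.getLast?_nil, Option.getD_none,
        List.reverse_cons, hrev, List.length_cons, List.length_reverse]
      congr 1
      push_cast
      omega
    · have hrev := pvTakeWhile_rev_append sw ts t hts
      by_cases ht : pvStop sw t = true
      · simp only [PySem.List.enumerate_cons, List.filter_cons, ht, Bool.not_true,
          Bool.false_eq_true, if_false, List.reverse_cons, hrev]
        rw [ih _ hts]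
        congr 1
        simp only [List.length_cons]
        push_cast
        omega
      · have hne : (((PySem.List.enumerate ts (s + 1)).filter (fun q => !(pvStop sw q.2))).map (·.1)) ≠ [] := by
          rw [ne_eq, pvKeep_nil_iff]; exact hts
        simp only [PySem.List.enumerate_cons, List.filter_cons, ht, Bool.not_false, if_true,
          List.map_cons, List.getLast?_cons, List.reverse_cons, hrev]
        rw [ih _ hts]
        simp only [Option.getD_some, Option.some.injEq, List.length_cons]
        push_cast
        omega

-- ===== VERDICT (by name: the statement is the Claim_ definition above) =====
theorem strip_stopwords_spec : Claim_equal_strip_stopwords := by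
  intro l sw _
  show strip_stopwords l sw = strip_stopwords_alt l sw
  by_cases hall : l.all (pvStop sw) = true
  · -- everything is a stopword: both sides are the empty slice
    have hkeep := (pvKeep_nil_iff sw l 0).mpr hall
    have htw : l.takeWhile (pvStop sw) = l :=
      List.takeWhile_eq_self_iff.mpr (by intro x hx; exact (List.all_eq_true.mp hall) x hx)
    simp only [strip_stopwords, strip_stopwords_alt, hkeep, pvLead_eq_takeWhile, htw,
      List.length_reverse, List.takeWhile_eq_self_iff.mpr
        (fun x hx => (List.all_eq_true.mp hall) x (List.mem_reverse.mp hx))]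
    rw [sub_self]
    have h0 : ((0 : Int)) = ((0 : Nat) : Int) := rfl
    rw [h0, PySem.List.slice_natCast, PySem.List.slice_natCast]
    simp
  · have hkh := pvKeep_head sw l 0 hall
    have hkl := pvKeep_last sw l 0 hall
    set keep := (((PySem.List.enumerate l 0).filter (fun q => !(pvStop sw q.2))).map (·.1)) with hk
    obtain ⟨i, rest, hcons⟩ : ∃ i rest, keep = i :: rest := by
      cases hkc : keep with
      | nil => rw [hkc] at hkh; simp at hkh
      | cons a b => exact ⟨a, b, rfl⟩
    have hi : i = ((l.takeWhile (pvStop sw)).length : Int) := by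
      rw [hcons] at hkh; simpa using hkh
    have hlast : keep.getLastD 0 + 1 = (l.length : Int) - ((l.reverse.takeWhile (pvStop sw)).length : Int) := by
      rw [List.getLastD_eq_getLast?, hkl]
      simp only [Option.getD_some]
      omega
    simp only [strip_stopwords, strip_stopwords_alt, pvLead_eq_takeWhile, ← hk, hcons]
    rw [← hcons, hlast, hi]
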